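-- pv_equiv track=rewrite | github.com/icaswell/trevorese | make_atom_images.py | word_height
-- ===== SOURCE A (Python) =====
-- low_letters = "qpgjy"
--
-- high_letters = "tfhklbd"
--
-- def word_height(w):
--   t = ""
--   for l in w:
--     if l in low_letters:
--       t += "l"
--     elif l in high_letters:
--       t += "h"
--   t = "".join(sorted(list(set(t))))
--   return t
-- ===== SOURCE B (Python) =====
-- low_letters = "qpgjy"
--
-- high_letters = "tfhklbd"
--
-- def word_height(w):
--   has_l = any(c in low_letters for c in w)
--   has_h = any(c in high_letters for c in w)
--   return ("h" if has_h else "") + ("l" if has_l else "")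
-- ===== Notes on version B (the rewrite author's own statement) =====
-- stated objective: simpler
-- what changed: Replaced the marker-string accumulation followed by set-dedup and sort with two direct existence tests (any low letter, any high letter) and a fixed 'h'-then-'l' concatenation.
import Mathlib
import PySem

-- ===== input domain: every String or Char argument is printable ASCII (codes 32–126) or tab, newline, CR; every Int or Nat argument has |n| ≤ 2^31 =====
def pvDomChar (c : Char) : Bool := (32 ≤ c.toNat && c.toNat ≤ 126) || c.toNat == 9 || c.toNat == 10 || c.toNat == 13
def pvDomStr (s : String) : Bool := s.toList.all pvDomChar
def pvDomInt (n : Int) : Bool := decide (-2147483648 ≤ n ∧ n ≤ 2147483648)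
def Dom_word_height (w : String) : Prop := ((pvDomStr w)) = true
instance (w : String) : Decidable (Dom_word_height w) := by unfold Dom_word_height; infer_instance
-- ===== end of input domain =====

-- B computes the two existence tests directly instead of accumulating markers, deduping and sorting (objective: simpler).

-- ===== PORT A =====
-- helper: the loop body (if l in low: t+='l' elif l in high: t+='h')
def pvStep : List Char → Char → List Char := fun t l =>
  if "qpgjy".toList.contains l then t ++ ['l']
  else if "tfhklbd".toList.contains l then t ++ ['h']
  else t

-- for l in w: append markers via pvStep; then "".join(sorted(list(set(t))))
def word_height (w : String) : String :=
  let t : List Char := w.toList.foldl pvStep []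
  String.ofList (PySem.List.sorted (PySem.Set.ofList t) (fun x => x) false)

-- ===== PORT B =====
def word_height_alt (w : String) : String :=
  let has_l := w.toList.any (fun c => "qpgjy".toList.contains c)
  let has_h := w.toList.any (fun c => "tfhklbd".toList.contains c)
  String.ofList ((if has_h then ['h'] else []) ++ (if has_l then ['l'] else []))

-- ===== PRECONDITION & SPEC =====
def Spec_word_height (w : String) (out : String) : Prop := out = word_height_alt w
instance (w : String) (out : String) : Decidable (Spec_word_height w out) := by unfold Spec_word_height; infer_instance

-- ===== CLAIM (what is proved, stated in full; the proofs are below) =====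
def Claim_equal_word_height : Prop := ∀ (w : String), Dom_word_height w → Spec_word_height w (word_height w)

-- ===== LEMMAS AND PROOFS =====

lemma pvLowNotHigh (c : Char) (h : "qpgjy".toList.contains c = true) :
    "tfhklbd".toList.contains c = false := by
  rcases (by simpa using h : c = 'q' ∨ c = 'p' ∨ c = 'g' ∨ c = 'j' ∨ c = 'y') with
    h | h | h | h | h <;> subst h <;> decide

lemma pvFold_spec (cs : List Char) (t : List Char) :
    (∀ c ∈ cs.foldl pvStep t, c ∈ t ∨ c = 'l' ∨ c = 'h') ∧
    ('l' ∈ cs.foldl pvStep t ↔ 'l' ∈ t ∨ cs.any (fun c => "qpgjy".toList.contains c)) ∧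
    ('h' ∈ cs.foldl pvStep t ↔ 'h' ∈ t ∨ cs.any (fun c => "tfhklbd".toList.contains c)) := by
  induction cs generalizing t with
  | nil => exact ⟨fun c hc => Or.inl hc, by simp, by simp⟩
  | cons c cs ih =>
    simp only [List.foldl_cons, List.any_cons, Bool.or_eq_true]
    have h := ih (pvStep t c)
    refine ⟨?_, ?_, ?_⟩
    · intro x hx
      rcases h.1 x hx with hx' | hx'
      · unfold pvStep at hx'
        split_ifs at hx' <;> simp_all <;> tauto
      · tauto
    · rw [h.2.1]
      unfold pvStep
      split_ifs with h1 h2 <;> simp_all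
    · rw [h.2.2]
      unfold pvStep
      split_ifs with h1 h2
      · have := pvLowNotHigh c h1
        simp_all
      · simp_all
      · simp_all

lemma pvSorted_two (t : List Char) (hsub : ∀ c ∈ t, c = 'l' ∨ c = 'h') :
    PySem.List.sorted (PySem.Set.ofList t) (fun x => x) false =
      (if 'h' ∈ t then ['h'] else []) ++ (if 'l' ∈ t then ['l'] else []) := by
  apply PySem.List.sorted_eq_of_perm_of_pairwise_lt
  · rw [List.perm_ext_iff_of_nodup ?_ (PySem.Set.nodup_ofList t)]
    · intro a
      simp only [PySem.Set.mem_ofList]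
      constructor
      · intro ha
        have hcase : a = 'h' ∧ 'h' ∈ t ∨ a = 'l' ∧ 'l' ∈ t := by
          split_ifs at ha with hh hl hl2
          · simp only [List.mem_append, List.mem_singleton] at ha
            rcases ha with rfl | rfl
            exacts [Or.inl ⟨rfl, hh⟩, Or.inr ⟨rfl, hl⟩]
          · simp only [List.append_nil, List.mem_singleton] at ha
            exact Or.inl ⟨ha, hh⟩
          · simp only [List.nil_append, List.mem_singleton] at ha
            exact Or.inr ⟨ha, hl2⟩
          · simp at ha
        rcases hcase with ⟨rfl, h2⟩ | ⟨rfl, h2⟩ <;> exact h2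
      · intro ha
        rcases hsub a ha with h | h <;> subst h <;> split_ifs <;> simp_all
    · split_ifs <;> decide
  · split_ifs <;> decide

lemma word_height_eq (w : String) : word_height w = word_height_alt w := by
  simp only [word_height, word_height_alt]
  have h := pvFold_spec w.toList []
  simp only [List.not_mem_nil, false_or] at h
  congr 1
  rw [pvSorted_two _ h.1]
  simp only [h.2.1, h.2.2]

-- ===== VERDICT (by name: the statement is the Claim_ definition above) =====
theorem word_height_spec : Claim_equal_word_height := by
  intro w _
  exact word_height_eq w
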